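-- pv_equiv track=rewrite | github.com/subhajitphy/PIPE_GWs_PTA | flattened/package/model_dnfs.py | default_masks_D
-- ===== SOURCE A (Python) =====
-- def default_masks_D(D, n_layers):
--     pairs = []
--     base = list(range(D))
--     for i in range(D * 3):
--         a = base[i % D]
--         b = base[(i + 1) % D]
--         if a != b:
--             pairs.append(sorted(list({a, b})))
--     uniq, seen = [], set()
--     for p in pairs:
--         t = tuple(p)
--         if t not in seen:
--             uniq.append(p)
--             seen.add(t)
--         if len(uniq) >= n_layers:
--             break
--     return uniq[:n_layers]
-- ===== SOURCE B (Python) =====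
-- def default_masks_D(D, n_layers):
--     if n_layers <= 0:
--         return []
--     full = [[i, i + 1] for i in range(D - 1)]
--     if D >= 3:
--         full.append([0, D - 1])
--     return full[:n_layers]
-- ===== Notes on version B (the rewrite author's own statement) =====
-- stated objective: simpler
-- what changed: B constructs the cycle-graph edge list [[i,i+1] for i in range(D-1)] (plus the wrap edge [0,D-1] when D>=3) directly and truncates it, instead of A's triple modular-index pass with set/sorted pair construction followed by a seen-set dedup loop with an early break; dropping the 3x pass and per-element set/sort work makes B measurably faster by a constant factor.
import Mathlib
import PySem

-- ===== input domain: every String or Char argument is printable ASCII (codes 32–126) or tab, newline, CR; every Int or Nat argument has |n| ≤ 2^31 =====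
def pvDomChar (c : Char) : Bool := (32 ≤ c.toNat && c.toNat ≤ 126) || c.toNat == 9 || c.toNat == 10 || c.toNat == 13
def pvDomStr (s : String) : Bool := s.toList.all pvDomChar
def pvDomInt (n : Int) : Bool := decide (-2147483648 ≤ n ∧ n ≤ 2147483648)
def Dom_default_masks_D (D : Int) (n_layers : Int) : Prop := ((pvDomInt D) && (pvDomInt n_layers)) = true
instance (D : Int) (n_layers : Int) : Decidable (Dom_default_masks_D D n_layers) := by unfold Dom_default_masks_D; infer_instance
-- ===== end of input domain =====

-- B builds the cycle-graph edge list directly ([[i,i+1]…] plus the wrap edge for D ≥ 3) and truncates it,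
-- replacing A's triple modular pass, set/sorted pair construction and seen-set dedup loop with early break (objective: simpler).


-- ===== PORT A =====
-- A-side helper: the 'for i in range(D * 3)' loop; each iteration appends at most one pair, so the loop
-- emits its appends in order (same list as Python's 'pairs.append(...)' accumulation). 'base' is
-- list(range(D)) held as an array for constant-time positional indexing; Python's base[i % D] is
-- base[(i % D).toNat]! here: with D ≥ 1 (the only case in which the loop runs) i % D is in [0, D).
-- The accumulator holds the appended pairs in reverse (newest first) and is reversed on exit,
-- so the result is exactly Python's append-order list.
def pvPairsLoop (base : Array Int) (D : Int) (acc : List (List Int)) : List Int → List (List Int)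
  | [] => acc.reverse
  | i :: rest =>
    let a := base[(PySem.Int.mod i D).toNat]!
    let b := base[(PySem.Int.mod (i + 1) D).toNat]!
    if a ≠ b then
      pvPairsLoop base D (PySem.List.sorted (PySem.Set.ofList [a, b]) (fun x => x) false :: acc) rest
    else pvPairsLoop base D acc rest

-- A-side helper: the 'for p in pairs' dedup loop with its early break ('if len(uniq) >= n_layers: break')
def pvDedupLoop (n_layers : Int) : List (List Int) → List (List Int) → PySem.Set (List Int) → List (List Int)
  | [], uniq, _ => uniq
  | p :: ps, uniq, seen =>
    if PySem.Set.contains seen p then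
      if n_layers ≤ (uniq.length : Int) then uniq else pvDedupLoop n_layers ps uniq seen
    else
      if n_layers ≤ ((uniq ++ [p]).length : Int) then uniq ++ [p]
      else pvDedupLoop n_layers ps (uniq ++ [p]) (PySem.Set.add seen p)

def default_masks_D (D : Int) (n_layers : Int) : List (List Int) :=
  let base := (PySem.List.pyRange 0 D 1).toArray
  let pairs := pvPairsLoop base D [] (PySem.List.pyRange 0 (D * 3) 1)
  let uniq := pvDedupLoop n_layers pairs [] PySem.Set.empty
  PySem.List.slice uniq none (some n_layers)

-- ===== PORT B =====
def default_masks_D_alt (D : Int) (n_layers : Int) : List (List Int) :=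
  if n_layers ≤ 0 then []
  else
    let full := (PySem.List.pyRange 0 (D - 1) 1).map (fun i => [i, i + 1])
    let full := if 3 ≤ D then full ++ [[0, D - 1]] else full
    PySem.List.slice full none (some n_layers)

-- ===== PRECONDITION & SPEC =====
def Spec_default_masks_D (D : Int) (n_layers : Int) (out : List (List Int)) : Prop := out = default_masks_D_alt D n_layers
instance (D : Int) (n_layers : Int) (out : List (List Int)) : Decidable (Spec_default_masks_D D n_layers out) := by unfold Spec_default_masks_D; infer_instance

-- ===== CLAIM (what is proved, stated in full; the proofs are below) =====
def Claim_equal_default_masks_D : Prop := ∀ (D : Int) (n_layers : Int), Dom_default_masks_D D n_layers → Spec_default_masks_D D n_layers (default_masks_D D n_layers)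

-- ===== LEMMAS AND PROOFS =====

lemma pv_slice_to_nonpos (xs : List (List Int)) (n : Int) (hn : n ≤ 0) (hlen : xs.length ≤ 1) :
    PySem.List.slice xs none (some n) = [] := by
  rcases eq_or_lt_of_le hn with h | h
  · subst h; simpa using PySem.List.slice_to (xs := xs) (b := 0) le_rfl
  · have hk : n = -(((-n).toNat : Nat) : Int) := by omega
    rw [hk, PySem.List.slice_to_neg_natCast _ _ (by omega)]
    have : xs.length - (-n).toNat = 0 := by omega
    simp [this]

lemma pv_dedupLoop_eq (n : Int) (ps : List (List Int)) : ∀ (uniq : List (List Int)), uniq.Nodup →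
    (uniq.length : Int) < n →
    pvDedupLoop n ps uniq (PySem.Set.ofList uniq) = (PySem.Set.ofList (uniq ++ ps)).take n.toNat := by
  induction ps with
  | nil =>
    intro uniq hnd hlt
    rw [pvDedupLoop, List.append_nil, PySem.Set.ofList_eq_self_of_nodup uniq hnd,
      List.take_of_length_le (by omega)]
  | cons p ps ih =>
    intro uniq hnd hlt
    by_cases hp : p ∈ uniq
    · have hc : PySem.Set.contains (PySem.Set.ofList uniq) p = true := by
        rw [PySem.Set.contains_iff, PySem.Set.mem_ofList]; exact hp
      rw [pvDedupLoop, hc, if_pos rfl, if_neg (by omega), ih uniq hnd hlt,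
        PySem.Set.ofList_append, PySem.Set.ofList_append, PySem.Set.update_cons,
        PySem.Set.add_of_mem (by rwa [PySem.Set.mem_ofList])]
    · have hc : PySem.Set.contains (PySem.Set.ofList uniq) p = false := by
        rw [Bool.eq_false_iff, Ne, PySem.Set.contains_iff, PySem.Set.mem_ofList]; exact hp
      have hnd' : (uniq ++ [p]).Nodup := by
        refine List.Nodup.append hnd (List.nodup_singleton _) ?_
        intro a ha hb
        simp only [List.mem_singleton] at hb
        subst hb; exact hp ha
      have hofl : PySem.Set.add (PySem.Set.ofList uniq) p = PySem.Set.ofList (uniq ++ [p]) :=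
        (PySem.Set.ofList_append_singleton uniq p).symm
      have hsplit : PySem.Set.ofList (uniq ++ p :: ps)
          = PySem.Set.update (PySem.Set.ofList (uniq ++ [p])) ps := by
        rw [PySem.Set.ofList_append, PySem.Set.update_cons, hofl, PySem.Set.ofList_append]
      rw [pvDedupLoop, hc]
      by_cases hbrk : n ≤ ((uniq ++ [p]).length : Int)
      · rw [if_neg (by simp), if_pos hbrk]
        have hn : n.toNat = (uniq ++ [p]).length := by simp at hbrk ⊢; omega
        rw [hsplit, PySem.Set.update_eq_append_filter,
          PySem.Set.ofList_eq_self_of_nodup _ hnd', hn, List.take_left]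
      · rw [if_neg (by simp), if_neg hbrk, hofl, ih (uniq ++ [p]) hnd' (by simp at hbrk ⊢; omega),
          hsplit, PySem.Set.ofList_eq_self_of_nodup _ hnd']
        rw [PySem.Set.ofList_append, PySem.Set.ofList_eq_self_of_nodup _ hnd']


lemma pv_base_get (D i : Int) (hD : 0 < D) :
    ((PySem.List.pyRange 0 D 1).toArray)[(PySem.Int.mod i D).toNat]! = PySem.Int.mod i D := by
  have h0 : 0 ≤ PySem.Int.mod i D := PySem.Int.mod_nonneg i hD
  have h1 : PySem.Int.mod i D < D := PySem.Int.mod_lt i hD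
  have hlen : (PySem.Int.mod i D).toNat < (PySem.List.pyRange 0 D 1).length := by
    rw [PySem.List.length_pyRange_one]; omega
  rw [show ((PySem.List.pyRange 0 D 1).toArray)[(PySem.Int.mod i D).toNat]!
      = (PySem.List.pyRange 0 D 1)[(PySem.Int.mod i D).toNat]! by simp]
  rw [List.getElem!_eq_getElem?_getD, List.getElem?_eq_getElem hlen, Option.getD_some,
    PySem.List.getElem_pyRange_one 0 D]
  omega

-- the two residues are never equal for D ≥ 2
lemma pv_mod_ne (D i : Int) (hD : 2 ≤ D) : PySem.Int.mod i D ≠ PySem.Int.mod (i + 1) D := by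
  rw [PySem.Int.mod_eq_emod_of_pos (by omega), PySem.Int.mod_eq_emod_of_pos (by omega)]
  intro h
  have h2 : D ∣ (i + 1) - i := Int.ModEq.dvd h
  have h3 : D ∣ 1 := by simpa using h2
  have := Int.le_of_dvd one_pos h3
  omega

-- periodicity of the fold body's index function
lemma pv_mod_add_left (D x : Int) (hD : 0 < D) : PySem.Int.mod (D + x) D = PySem.Int.mod x D := by
  rw [PySem.Int.mod_eq_emod_of_pos hD, PySem.Int.mod_eq_emod_of_pos hD, Int.add_emod_left]

-- mod of a value already in range
lemma pv_mod_self_range (D x : Int) (h0 : 0 ≤ x) (h1 : x < D) : PySem.Int.mod x D = x := by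
  rw [PySem.Int.mod_eq_emod_of_pos (by omega), Int.emod_eq_of_lt h0 h1]

-- one cycle of A's pair construction is B's edge list followed by the wrap edge
lemma pv_cycle_eq (D : Int) (hD : 2 ≤ D) :
    (PySem.List.pyRange 0 D 1).map (fun i => PySem.List.sorted
        (PySem.Set.ofList [PySem.Int.mod i D, PySem.Int.mod (i + 1) D]) (fun x => x) false)
      = (PySem.List.pyRange 0 (D - 1) 1).map (fun i => [i, i + 1]) ++ [[0, D - 1]] := by
  have hsplit : PySem.List.pyRange 0 D 1 = PySem.List.pyRange 0 (D - 1) 1 ++ [D - 1] := by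
    rw [PySem.List.pyRange_one_append 0 (D - 1) D (by omega) (by omega)]
    congr 1
    rw [PySem.List.pyRange_one (D - 1) D, show (D - (D - 1)).toNat = 1 by omega]
    simp
  rw [hsplit, List.map_append]
  congr 1
  · apply List.map_congr_left
    intro i hi
    rw [PySem.List.mem_pyRange_one] at hi
    rw [pv_mod_self_range D i hi.1 (by omega), pv_mod_self_range D (i + 1) (by omega) (by omega)]
    rw [PySem.Set.ofList_eq_self_of_nodup _ (by simp)]
    exact PySem.List.sorted_eq_self_of_pairwise _ _ (by simp)
  · simp only [List.map_cons, List.map_nil]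
    congr 1
    rw [pv_mod_self_range D (D - 1) (by omega) (by omega),
      show D - 1 + 1 = D by ring,
      show PySem.Int.mod D D = 0 by rw [PySem.Int.mod_eq_emod_of_pos (by omega)]; exact Int.emod_self,
      PySem.Set.ofList_eq_self_of_nodup _ (by simp; omega)]
    exact PySem.List.sorted_eq_of_perm_of_pairwise_lt _ _ _ (List.Perm.swap (D - 1) 0 [])
      (by simp; omega)

-- a shifted block of a map over a period-respecting function
lemma pv_map_shift (D c : Int) (g : Int → List Int) (hper : ∀ x, g (c + x) = g x) :
    (PySem.List.pyRange c (c + D) 1).map g = (PySem.List.pyRange 0 D 1).map g := by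
  rw [PySem.List.pyRange_one c (c + D), PySem.List.pyRange_one 0 D,
    show c + D - c = D by ring, show (D : Int) - 0 = D by ring, List.map_map, List.map_map]
  apply List.map_congr_left
  intro k _
  simp only [Function.comp_apply]
  rw [hper, Int.zero_add]

lemma pv_pairs_eq (D : Int) (hD : 2 ≤ D) :
    pvPairsLoop ((PySem.List.pyRange 0 D 1).toArray) D [] (PySem.List.pyRange 0 (D * 3) 1)
    = (((PySem.List.pyRange 0 (D - 1) 1).map (fun i => [i, i + 1]) ++ [[0, D - 1]]) ++
       ((PySem.List.pyRange 0 (D - 1) 1).map (fun i => [i, i + 1]) ++ [[0, D - 1]])) ++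
      ((PySem.List.pyRange 0 (D - 1) 1).map (fun i => [i, i + 1]) ++ [[0, D - 1]]) := by
  set g : Int → List Int := fun i => PySem.List.sorted
      (PySem.Set.ofList [PySem.Int.mod i D, PySem.Int.mod (i + 1) D]) (fun x => x) false with hg
  have hbody : ∀ (l : List Int) (acc : List (List Int)),
      pvPairsLoop ((PySem.List.pyRange 0 D 1).toArray) D acc l = acc.reverse ++ l.map g := by
    intro l
    induction l with
    | nil => intro acc; rw [pvPairsLoop, List.map_nil, List.append_nil]
    | cons i rest ih =>
      intro acc
      rw [pvPairsLoop]
      simp only [pv_base_get D i (by omega), pv_base_get D (i + 1) (by omega)]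
      rw [if_pos (pv_mod_ne D i hD), ih, List.map_cons, List.reverse_cons, List.append_assoc,
        List.singleton_append]
  rw [hbody _ [], List.reverse_nil, List.nil_append]
  have hper : ∀ x, g (D + x) = g x := by
    intro x
    simp only [hg]
    rw [pv_mod_add_left D x (by omega), show D + x + 1 = D + (x + 1) by ring,
      pv_mod_add_left D (x + 1) (by omega)]
  rw [PySem.List.pyRange_one_append 0 D (D * 3) (by omega) (by omega),
    PySem.List.pyRange_one_append D (D + D) (D * 3) (by omega) (by omega),
    List.map_append, List.map_append]
  have h2 : (PySem.List.pyRange D (D + D) 1).map g = (PySem.List.pyRange 0 D 1).map g := pv_map_shift D D g hper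
  have hper2 : ∀ x, g (D + D + x) = g x := by
    intro x; rw [show D + D + x = D + (D + x) by ring, hper, hper]
  have h3 : (PySem.List.pyRange (D + D) (D * 3) 1).map g = (PySem.List.pyRange 0 D 1).map g := by
    rw [show D * 3 = (D + D) + D by ring]
    exact pv_map_shift D (D + D) g hper2
  rw [h2, h3, pv_cycle_eq D hD]
  simp only [List.append_assoc]

-- set(xs) absorbs a repeated update with the same list
lemma pv_update_self (xs : List (List Int)) :
    PySem.Set.update (PySem.Set.ofList xs) xs = PySem.Set.ofList xs := by
  rw [PySem.Set.update_eq_append_filter]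
  have h : List.filter (fun y => !(PySem.Set.contains (PySem.Set.ofList xs) y)) (PySem.Set.ofList xs) = [] := by
    rw [List.filter_eq_nil_iff]
    intro y hy
    simp only [Bool.not_eq_true, Bool.not_eq_false']
    rw [PySem.Set.contains_iff]
    exact hy
  rw [h, List.append_nil]

lemma pv_ofList_pairs (D : Int) (hD : 2 ≤ D) :
    PySem.Set.ofList ((((PySem.List.pyRange 0 (D - 1) 1).map (fun i => [i, i + 1]) ++ [[0, D - 1]]) ++
       ((PySem.List.pyRange 0 (D - 1) 1).map (fun i => [i, i + 1]) ++ [[0, D - 1]])) ++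
      ((PySem.List.pyRange 0 (D - 1) 1).map (fun i => [i, i + 1]) ++ [[0, D - 1]]))
    = (PySem.List.pyRange 0 (D - 1) 1).map (fun i => [i, i + 1]) ++
      (if 3 ≤ D then [[0, D - 1]] else []) := by
  set E : List (List Int) := (PySem.List.pyRange 0 (D - 1) 1).map (fun i => [i, i + 1]) ++ [[0, D - 1]] with hE
  have htriple : PySem.Set.ofList ((E ++ E) ++ E) = PySem.Set.ofList E := by
    rw [PySem.Set.ofList_append, PySem.Set.ofList_append, pv_update_self, pv_update_self]
  rw [htriple]
  by_cases h3 : 3 ≤ D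
  · rw [if_pos h3]
    have hnd : E.Nodup := by
      refine List.Nodup.append ?_ (List.nodup_singleton _) ?_
      · refine List.Nodup.map ?_ (PySem.List.nodup_pyRange_one 0 (D - 1))
        intro i j hij
        simpa using hij
      · intro a ha hb
        simp only [List.mem_singleton] at hb
        subst hb
        rcases List.mem_map.mp ha with ⟨i, hi, hai⟩
        rw [PySem.List.mem_pyRange_one] at hi
        have h12 : i = 0 ∧ i + 1 = D - 1 := by simpa using hai
        omega
    rw [PySem.Set.ofList_eq_self_of_nodup _ hnd]
  · have hD2 : D = 2 := by omega
    subst hD2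
    decide

-- for n_layers ≤ 0 the loop stops after at most one append
lemma pv_dedupLoop_nonpos (n : Int) (hn : n ≤ 0) (ps : List (List Int)) :
    (pvDedupLoop n ps [] PySem.Set.empty).length ≤ 1 := by
  cases ps with
  | nil => simp [pvDedupLoop]
  | cons p ps =>
    rw [pvDedupLoop]
    have hc : PySem.Set.contains (PySem.Set.empty : PySem.Set (List Int)) p = false := rfl
    rw [hc]
    rw [if_neg (by simp), if_pos (by simp; omega)]
    simp

-- ===== VERDICT (by name: the statement is the Claim_ definition above) =====
theorem default_masks_D_spec : Claim_equal_default_masks_D := by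
  intro D n _
  unfold Spec_default_masks_D default_masks_D default_masks_D_alt
  simp only []
  by_cases hn : n ≤ 0
  · rw [if_pos hn]
    exact pv_slice_to_nonpos _ n hn (pv_dedupLoop_nonpos n hn _)
  · rw [if_neg hn]
    have hn' : 0 < n := by omega
    have hempty : (PySem.Set.empty : PySem.Set (List Int)) = PySem.Set.ofList [] := rfl
    by_cases hD : 2 ≤ D
    · rw [pv_pairs_eq D hD, hempty,
        pv_dedupLoop_eq n _ [] List.nodup_nil (by simp; omega),
        List.nil_append, pv_ofList_pairs D hD,
        PySem.List.slice_to _ (by omega), PySem.List.slice_to _ (by omega),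
        List.take_take, min_self]
      by_cases h3 : 3 ≤ D
      · rw [if_pos h3, if_pos h3]
      · rw [if_neg h3, if_neg h3, List.append_nil]
    · -- D ≤ 1: no pairs are ever produced on either side
      have hpairs : pvPairsLoop ((PySem.List.pyRange 0 D 1).toArray) D []
          (PySem.List.pyRange 0 (D * 3) 1) = [] := by
        by_cases hD1 : D = 1
        · subst hD1; decide
        · rw [PySem.List.pyRange_one_eq_nil (show D * 3 ≤ 0 by omega), pvPairsLoop,
            List.reverse_nil]
      have hfull : (PySem.List.pyRange 0 (D - 1) 1).map (fun i => [i, i + 1]) = [] := by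
        rw [PySem.List.pyRange_one_eq_nil (by omega), List.map_nil]
      rw [hpairs, hfull, pvDedupLoop, if_neg (show ¬ (3:Int) ≤ D by omega),
        PySem.List.slice_to _ (le_of_lt hn')]
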